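-- pv_equiv track=rewrite | github.com/imMilanpatel/python-learning | Basics/Basic misc/anagram_dict.py | split_words_by_anagram_presence
-- ===== SOURCE A (Python) =====
-- from collections import defaultdict
-- from typing import Dict, Iterable, List, Tuple
--
-- def normalized_key(word: str) -> str:
--     """Return a normalized key for anagram comparison."""
--     return ''.join(sorted(word.replace(' ', '').lower()))
--
-- def find_anagram_groups(words: Iterable[str]) -> Dict[str, List[str]]:
--     """Group words by their sorted normalized letters."""
--     groups: Dict[str, List[str]] = defaultdict(list)
--     for word in words:
--         groups[normalized_key(word)].append(word)
--     return groups
--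
-- def split_words_by_anagram_presence(words: Iterable[str]) -> Tuple[List[str], List[str]]:
--     """Return (words_with_anagrams, words_without_anagrams)."""
--     groups = find_anagram_groups(words)
--     with_anagrams: List[str] = []
--     without_anagrams: List[str] = []
--
--     for word in words:
--         key = normalized_key(word)
--         if len(groups[key]) > 1:
--             with_anagrams.append(word)
--         else:
--             without_anagrams.append(word)
--
--     with_anagrams.sort(key=str.lower)
--     without_anagrams.sort(key=str.lower)
--     return with_anagrams, without_anagrams
-- ===== SOURCE B (Python) =====
-- def normalized_key(word: str) -> str:
--     """Return a normalized key for anagram comparison."""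
--     return ''.join(sorted(word.replace(' ', '').lower()))
--
-- def split_words_by_anagram_presence(words):
--     """Return (words_with_anagrams, words_without_anagrams)."""
--     keys = [normalized_key(w) for w in words]
--     skeys = sorted(keys)
--     dup_keys = {b for a, b in zip(skeys, skeys[1:]) if a == b}
--     with_anagrams, without_anagrams = [], []
--     for w, k in zip(words, keys):
--         (with_anagrams if k in dup_keys else without_anagrams).append(w)
--     with_anagrams.sort(key=str.lower)
--     without_anagrams.sort(key=str.lower)
--     return with_anagrams, without_anagrams
-- ===== Notes on version B (the rewrite author's own statement) =====
-- stated objective: alternative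
-- what changed: B detects shared anagram keys by sorting the key list once and collecting adjacent equal neighbours into a set (no dict/Counter grouping structure at all), then partitions the words in one appending pass by membership in that set; A builds a dict of word lists and re-scans the words re-looking up each group's length.
import Mathlib
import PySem

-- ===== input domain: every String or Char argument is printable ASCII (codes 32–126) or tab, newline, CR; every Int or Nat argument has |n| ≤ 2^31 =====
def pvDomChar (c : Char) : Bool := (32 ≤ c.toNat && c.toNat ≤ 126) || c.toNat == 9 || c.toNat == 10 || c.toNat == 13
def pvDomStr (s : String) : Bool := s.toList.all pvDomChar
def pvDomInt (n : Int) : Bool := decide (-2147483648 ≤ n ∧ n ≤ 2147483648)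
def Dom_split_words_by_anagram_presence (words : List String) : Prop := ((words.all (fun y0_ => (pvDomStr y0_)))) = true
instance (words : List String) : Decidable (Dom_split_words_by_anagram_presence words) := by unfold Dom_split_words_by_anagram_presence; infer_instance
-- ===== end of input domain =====

-- B replaces A's dict-of-word-lists grouping (and the second word loop re-looking up each group's
-- length) by sorting the normalized-key list once and collecting adjacent equal neighbours into the
-- set of duplicated keys, then partitioning the words in one appending pass — alternative algorithm, same cost.


-- ===== PORT A =====
-- ''.join(sorted(word.replace(' ', '').lower())): sorted over the characters (Python compares
-- 1-char strings by code point = Lean's Char order), joined back into a String — exact on Dom.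
def normalized_key (word : String) : String :=
  String.ofList (PySem.List.sorted ((PySem.Str.lower (PySem.Str.replace word " " "")).toList) (fun c => c) false)

def split_words_by_anagram_presence (words : List String) : List String × List String :=
  let groups : PySem.Dict String (List String) :=
    words.foldl (fun d word => d.modify (normalized_key word) [] (fun l => l ++ [word])) PySem.Dict.empty
  let p := words.foldl
    (fun (p : List String × List String) word =>
      if (groups.getD (normalized_key word) []).length > 1 then (p.1 ++ [word], p.2)
      else (p.1, p.2 ++ [word]))
    ([], [])
  (PySem.List.sorted p.1 (fun s => PySem.Str.lower s) false,
   PySem.List.sorted p.2 (fun s => PySem.Str.lower s) false)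

-- ===== PORT B =====
def split_words_by_anagram_presence_alt (words : List String) : List String × List String :=
  let keys := words.map normalized_key
  let skeys := PySem.List.sorted keys (fun x => x) false
  let dup_keys : PySem.Set String :=
    PySem.Set.ofList
      (((skeys.zip (PySem.List.slice skeys (some 1) none)).filter (fun q => q.1 == q.2)).map Prod.snd)
  let p := (words.zip keys).foldl
    (fun (p : List String × List String) q =>
      if PySem.Set.contains dup_keys q.2 then (p.1 ++ [q.1], p.2) else (p.1, p.2 ++ [q.1]))
    ([], [])
  (PySem.List.sorted p.1 (fun s => PySem.Str.lower s) false,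
   PySem.List.sorted p.2 (fun s => PySem.Str.lower s) false)

-- ===== PRECONDITION & SPEC =====
def Spec_split_words_by_anagram_presence (words : List String) (out : List String × List String) : Prop := out = split_words_by_anagram_presence_alt words
instance (words : List String) (out : List String × List String) : Decidable (Spec_split_words_by_anagram_presence words out) := by unfold Spec_split_words_by_anagram_presence; infer_instance

-- ===== CLAIM (what is proved, stated in full; the proofs are below) =====
def Claim_equal_split_words_by_anagram_presence : Prop := ∀ (words : List String), Dom_split_words_by_anagram_presence words → Spec_split_words_by_anagram_presence words (split_words_by_anagram_presence words)

-- ===== LEMMAS AND PROOFS =====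

-- A's group for key k holds exactly the words with normalized key k, in order.
lemma groups_getD (words : List String) (k : String) :
    (words.foldl (fun d word => d.modify (normalized_key word) [] (fun l => l ++ [word]))
        PySem.Dict.empty).getD k []
      = words.filter (fun w => normalized_key w == k) := by
  have hmap : (words.foldl (fun d word => d.modify (normalized_key word) [] (fun l => l ++ [word]))
        (PySem.Dict.empty : PySem.Dict String (List String)))
      = ((words.map (fun w => (normalized_key w, w))).foldl
          (fun d q => d.modify q.1 [] (fun l => l ++ [q.2])) PySem.Dict.empty) := by
    rw [List.foldl_map]
  rw [hmap, PySem.Dict.getD_foldl_modify_append]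
  simp [List.filter_map, Function.comp_def, List.map_map]

-- Both partition loops, in closed form.
lemma part_fold {α β : Type} (c : α → Prop) [DecidablePred c] (f : α → β) (ws : List α) (a b : List β) :
    ws.foldl
        (fun (p : List β × List β) x =>
          if c x then (p.1 ++ [f x], p.2) else (p.1, p.2 ++ [f x])) (a, b)
      = (a ++ (ws.filter (fun x => decide (c x))).map f,
         b ++ (ws.filter (fun x => !decide (c x))).map f) := by
  induction ws generalizing a b with
  | nil => simp
  | cons x ws ih =>
    simp only [List.foldl_cons]
    by_cases h : c x
    · rw [if_pos h, ih]; simp [h]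
    · rw [if_neg h, ih]; simp [h]

-- zip(words, [key(w) for w in words]) pairs each word with its key.
lemma zip_keys (words : List String) :
    words.zip (words.map normalized_key) = words.map (fun w => (w, normalized_key w)) := by
  induction words with
  | nil => rfl
  | cons w ws ih => simp [ih]

-- In a ≤-sorted list, a value is the right component of an adjacent equal pair iff it occurs twice.
lemma mem_adjDups (s : List String) (h : s.Pairwise (· ≤ ·)) (k : String) :
    k ∈ ((s.zip s.tail).filter (fun q => q.1 == q.2)).map Prod.snd ↔ 2 ≤ s.count k := by
  induction s with
  | nil => simp
  | cons a t iht =>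
    cases t with
    | nil =>
      have h1 : List.count k [a] ≤ 1 := by
        by_cases hk : a = k <;> simp [hk]
      simp only [List.tail_cons, List.zip_nil_right, List.filter_nil, List.map_nil,
        List.not_mem_nil, false_iff]
      omega
    | cons b t =>
      have hab : a ≤ b := (List.pairwise_cons.mp h).1 b (by simp)
      have hbt : (b :: t).Pairwise (· ≤ ·) := (List.pairwise_cons.mp h).2
      have hb_all : ∀ x ∈ t, b ≤ x := (List.pairwise_cons.mp hbt).1
      have ih := iht hbt
      simp only [List.tail_cons] at ih ⊢
      rw [List.zip_cons_cons, List.filter_cons]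
      by_cases hab' : a = b
      · subst hab'
        simp only [BEq.rfl, if_pos, List.map_cons, List.mem_cons]
        by_cases hk : k = a
        · subst hk
          simp only [List.count_cons_self, true_or, true_iff]
          omega
        · simp only [hk, false_or]
          rw [ih]
          simp [List.count_cons_of_ne (Ne.symm hk)]
      · have hfalse : (a == b) = false := beq_eq_false_iff_ne.mpr hab'
        rw [hfalse]
        simp only [Bool.false_eq_true, if_false]
        rw [ih]
        by_cases hk : k = a
        · subst hk
          have h0 : List.count k (b :: t) = 0 := List.count_eq_zero_of_not_mem (by
            intro hm
            rcases List.mem_cons.mp hm with h1 | h2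
            · exact hab' h1
            · exact hab' (le_antisymm hab (hb_all k h2)))
          rw [List.count_cons_self, h0]
          simp
        · rw [List.count_cons_of_ne (Ne.symm hk)]

-- B's duplicate test equals A's group-length test, for every word of the input.
lemma dup_iff_group_gt_one (words : List String) (w : String) :
    PySem.Set.contains
        (PySem.Set.ofList
          ((((PySem.List.sorted (words.map normalized_key) (fun x => x) false).zip
              (PySem.List.slice (PySem.List.sorted (words.map normalized_key) (fun x => x) false)
                (some 1) none)).filter (fun q => q.1 == q.2)).map Prod.snd))
        (normalized_key w)
      = decide ((words.filter (fun u => normalized_key u == normalized_key w)).length > 1) := by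
  set keys := words.map normalized_key with hkeys
  set s := PySem.List.sorted keys (fun x => x) false with hs
  have hslice : PySem.List.slice s (some 1) none = s.tail := PySem.List.slice_from_one s
  have hpair : s.Pairwise (· ≤ ·) := by
    have := PySem.List.sorted_pairwise keys (fun x => x) (κ := String)
    simpa [hs] using this
  have hcount : s.count (normalized_key w) = keys.count (normalized_key w) :=
    (PySem.List.sorted_perm keys (fun x => x) false).count_eq _
  have hlen : (words.filter (fun u => normalized_key u == normalized_key w)).length
      = keys.count (normalized_key w) := by
    rw [hkeys, List.count_eq_countP, List.countP_map, ← List.countP_eq_length_filter]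
    simp [Function.comp_def]
  rw [hslice, Bool.eq_iff_iff, PySem.Set.contains_iff, PySem.Set.mem_ofList,
    mem_adjDups s hpair, decide_eq_true_eq, hcount, ← hlen]
  omega

-- ===== VERDICT (by name: the statement is the Claim_ definition above) =====
theorem split_words_by_anagram_presence_spec : Claim_equal_split_words_by_anagram_presence := by
  intro words _
  unfold Spec_split_words_by_anagram_presence
  unfold split_words_by_anagram_presence split_words_by_anagram_presence_alt
  simp only [zip_keys, part_fold, List.filter_map, List.map_map, List.nil_append,
    Function.comp_def, List.map_id']
  rw [Prod.ext_iff]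
  refine ⟨congrArg (fun l => PySem.List.sorted l (fun s => PySem.Str.lower s) false)
            (List.filter_congr fun w _ => ?_),
          congrArg (fun l => PySem.List.sorted l (fun s => PySem.Str.lower s) false)
            (List.filter_congr fun w _ => ?_)⟩ <;>
    rw [groups_getD, ← dup_iff_group_gt_one words w] <;>
    simp
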